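-- pv_equiv track=rewrite | github.com/adbcox/integrated-ai-platform | bin/level10_qualify.py | summarize_rag6
-- ===== SOURCE A (Python) =====
-- from typing import Any, Iterable
--
-- def summarize_rag6(rag6_rows: list[dict[str, Any]]) -> dict[str, Any]:
--     plans = len(rag6_rows)
--     clusters = 0
--     with_risk = 0
--     with_yield = 0
--     for row in rag6_rows:
--         subplans = row.get("subplans", []) or []
--         clusters += len(subplans)
--         for sub in subplans:
--             if not isinstance(sub, dict):
--                 continue
--             if "risk_score" in sub and "conflict_signals" in sub:
--                 with_risk += 1
--             if "yield_score" in sub: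
--                 with_yield += 1
--     return {
--         "plans": plans,
--         "clusters": clusters,
--         "clusters_with_risk": with_risk,
--         "clusters_with_yield": with_yield,
--     }
-- ===== SOURCE B (Python) =====
-- def summarize_rag6(rag6_rows):
--     # Divide-and-conquer map-reduce: a single row is summarized directly; longer
--     # inputs are split in half, each half summarized recursively, and the two
--     # summary dicts merged by pointwise addition (summaries form a monoid).
--     if not rag6_rows:
--         return {"plans": 0, "clusters": 0,
--                 "clusters_with_risk": 0, "clusters_with_yield": 0}
--     if len(rag6_rows) == 1:
--         row = rag6_rows[0]
--         subplans = row.get("subplans", []) or []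
--         dsubs = [s for s in subplans if isinstance(s, dict)]
--         return {
--             "plans": 1,
--             "clusters": len(subplans),
--             "clusters_with_risk": sum(1 for s in dsubs
--                                       if "risk_score" in s and "conflict_signals" in s),
--             "clusters_with_yield": sum(1 for s in dsubs if "yield_score" in s),
--         }
--     mid = len(rag6_rows) // 2
--     left = summarize_rag6(rag6_rows[:mid])
--     right = summarize_rag6(rag6_rows[mid:])
--     return {k: left[k] + right[k] for k in left}
-- ===== Notes on version B (the rewrite author's own statement) =====
-- stated objective: alternative
-- what changed: Replaces the fused three-counter accumulator loop with a divide-and-conquer map-reduce: the row list is split in half recursively, each half summarized, and the two summary dicts merged by pointwise addition; a singleton row is summarized directly.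
import Mathlib
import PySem

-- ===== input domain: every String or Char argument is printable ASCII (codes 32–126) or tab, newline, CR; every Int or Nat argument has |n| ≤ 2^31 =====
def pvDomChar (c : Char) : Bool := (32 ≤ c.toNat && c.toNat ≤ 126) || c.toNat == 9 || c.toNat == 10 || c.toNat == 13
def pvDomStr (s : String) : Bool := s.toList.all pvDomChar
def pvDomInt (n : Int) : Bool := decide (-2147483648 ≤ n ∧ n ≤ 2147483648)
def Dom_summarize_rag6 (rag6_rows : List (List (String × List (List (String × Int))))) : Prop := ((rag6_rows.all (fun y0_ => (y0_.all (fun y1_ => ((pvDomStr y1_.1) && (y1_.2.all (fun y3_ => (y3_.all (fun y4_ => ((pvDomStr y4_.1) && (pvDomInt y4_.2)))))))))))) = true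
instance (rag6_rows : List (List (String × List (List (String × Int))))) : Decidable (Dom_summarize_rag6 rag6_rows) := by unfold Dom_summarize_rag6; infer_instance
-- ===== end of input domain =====

-- B replaces A's fused three-counter accumulator loop by a divide-and-conquer map-reduce:
-- split the rows in half, summarize each half recursively, merge summaries by pointwise
-- addition (objective: alternative; same results, different algorithm structure).
-- Under the type convention every subplan is a dict, so Python's `isinstance(sub, dict)`
-- is always true, and `row.get("subplans", []) or []` equals `row.get("subplans", [])`
-- (the only falsy value of the list type is [], which `or` maps to [] again).

-- dict membership "k in d" / first-match lookup on the association list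
def pvHasKey (d : List (String × Int)) (k : String) : Bool := (List.lookup k d).isSome

-- ===== PORT A =====
-- the body of A's inner `for sub in subplans` loop (three mutable counters)
def stepSub (a : Int × Int × Int) (sub : List (String × Int)) : Int × Int × Int :=
  -- `isinstance(sub, dict)` is always true under the type convention
  let a := if pvHasKey sub "risk_score" && pvHasKey sub "conflict_signals"
           then (a.1, a.2.1 + 1, a.2.2) else a
  if pvHasKey sub "yield_score" then (a.1, a.2.1, a.2.2 + 1) else a

-- the body of A's outer `for row in rag6_rows` loop
def stepRow (acc : Int × Int × Int) (row : List (String × List (List (String × Int)))) : Int × Int × Int :=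
  let subplans := (List.lookup "subplans" row).getD []
  subplans.foldl stepSub (acc.1 + subplans.length, acc.2.1, acc.2.2)

-- the fused loop: state (clusters, with_risk, with_yield); plans = len outside the loop
def summarize_rag6 (rag6_rows : List (List (String × List (List (String × Int))))) : List (String × Int) :=
  let plans : Int := rag6_rows.length
  let st : Int × Int × Int := rag6_rows.foldl stepRow (0, 0, 0)
  [("plans", plans), ("clusters", st.1),
   ("clusters_with_risk", st.2.1), ("clusters_with_yield", st.2.2)]

-- ===== PORT B =====
-- Python's `{k: left[k] + right[k] for k in left}`; `right` always carries exactly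
-- the keys of `left` (both are summaries), so the lookup's default is never used.
def pvMerge (left right : List (String × Int)) : List (String × Int) :=
  left.map (fun kv => (kv.1, kv.2 + (List.lookup kv.1 right).getD 0))

-- the base case of Source B: the summary of a single row
def pvSingle (row : List (String × List (List (String × Int)))) : List (String × Int) :=
  let subplans := (List.lookup "subplans" row).getD []
  -- dsubs = [s for s in subplans if isinstance(s, dict)] keeps everything here
  [("plans", (1 : Int)),
   ("clusters", (subplans.length : Int)),
   ("clusters_with_risk",
     ((subplans.countP (fun s => pvHasKey s "risk_score" && pvHasKey s "conflict_signals") : Nat) : Int)),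
   ("clusters_with_yield", ((subplans.countP (fun s => pvHasKey s "yield_score") : Nat) : Int))]

def summarize_rag6_alt (rag6_rows : List (List (String × List (List (String × Int))))) : List (String × Int) :=
  match rag6_rows with
  | [] => [("plans", 0), ("clusters", 0), ("clusters_with_risk", 0), ("clusters_with_yield", 0)]
  | [row] => pvSingle row
  | a :: b :: t =>
    let rows := a :: b :: t
    let mid := rows.length / 2
    pvMerge (summarize_rag6_alt (rows.take mid)) (summarize_rag6_alt (rows.drop mid))
termination_by rag6_rows.length
decreasing_by
  · simp [List.length_take]; omega
  · simp [List.length_drop]; omega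

-- ===== PRECONDITION & SPEC =====
def Spec_summarize_rag6 (rag6_rows : List (List (String × List (List (String × Int))))) (out : List (String × Int)) : Prop := out = summarize_rag6_alt rag6_rows
instance (rag6_rows : List (List (String × List (List (String × Int))))) (out : List (String × Int)) : Decidable (Spec_summarize_rag6 rag6_rows out) := by unfold Spec_summarize_rag6; infer_instance

-- ===== CLAIM (what is proved, stated in full; the proofs are below) =====
def Claim_equal_summarize_rag6 : Prop := ∀ (rag6_rows : List (List (String × List (List (String × Int))))), Dom_summarize_rag6 rag6_rows → Spec_summarize_rag6 rag6_rows (summarize_rag6 rag6_rows)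

-- ===== LEMMAS AND PROOFS =====

-- the common closed form both ports are reduced to
def subsOf (row : List (String × List (List (String × Int)))) : List (List (String × Int)) :=
  (List.lookup "subplans" row).getD []

def closedForm (rows : List (List (String × List (List (String × Int))))) : List (String × Int) :=
  [("plans", (rows.length : Int)),
   ("clusters", ((rows.flatMap subsOf).length : Int)),
   ("clusters_with_risk",
     (((rows.flatMap subsOf).countP (fun s => pvHasKey s "risk_score" && pvHasKey s "conflict_signals") : Nat) : Int)),
   ("clusters_with_yield", (((rows.flatMap subsOf).countP (fun s => pvHasKey s "yield_score") : Nat) : Int))]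

-- the inner subplan fold of A, characterised against counts
lemma inner_fold_char (subs : List (List (String × Int))) (a : Int × Int × Int) :
    subs.foldl stepSub a
    = (a.1,
       a.2.1 + (subs.countP (fun sub => pvHasKey sub "risk_score" && pvHasKey sub "conflict_signals") : Int),
       a.2.2 + (subs.countP (fun sub => pvHasKey sub "yield_score") : Int)) := by
  induction subs generalizing a with
  | nil => simp
  | cons s t ih =>
    rw [List.foldl_cons, ih]
    by_cases h1 : (pvHasKey s "risk_score" && pvHasKey s "conflict_signals") = true <;>
      by_cases h2 : pvHasKey s "yield_score" = true <;>
        simp [stepSub, h1, h2, Prod.ext_iff] <;> omega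

-- the outer fold of A, characterised against the flatMap aggregates
lemma outer_fold_char (rows : List (List (String × List (List (String × Int))))) (acc : Int × Int × Int) :
    rows.foldl stepRow acc
    = (acc.1 + ((rows.flatMap subsOf).length : Int),
       acc.2.1 + ((rows.flatMap subsOf).countP
                    (fun sub => pvHasKey sub "risk_score" && pvHasKey sub "conflict_signals") : Int),
       acc.2.2 + ((rows.flatMap subsOf).countP
                    (fun sub => pvHasKey sub "yield_score") : Int)) := by
  induction rows generalizing acc with
  | nil => simp
  | cons r t ih =>
    rw [List.foldl_cons, ih]
    simp only [stepRow, inner_fold_char, List.flatMap_cons, List.length_append,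
               List.countP_append, subsOf, Prod.ext_iff]
    refine ⟨?_, ?_, ?_⟩ <;> push_cast <;> ring

lemma a_closed (rows : List (List (String × List (List (String × Int))))) :
    summarize_rag6 rows = closedForm rows := by
  simp [summarize_rag6, closedForm, outer_fold_char]

-- merging the closed forms of two halves gives the closed form of their concatenation
lemma merge_closed (xs ys : List (List (String × List (List (String × Int))))) :
    pvMerge (closedForm xs) (closedForm ys) = closedForm (xs ++ ys) := by
  simp [pvMerge, closedForm, List.lookup, List.flatMap_append, List.countP_append]

lemma alt_closed (rows : List (List (String × List (List (String × Int))))) :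
    summarize_rag6_alt rows = closedForm rows := by
  match rows with
  | [] => simp [summarize_rag6_alt, closedForm]
  | [row] => simp [summarize_rag6_alt, pvSingle, closedForm, subsOf]
  | a :: b :: t =>
    rw [summarize_rag6_alt]
    rw [alt_closed ((a :: b :: t).take ((a :: b :: t).length / 2)),
        alt_closed ((a :: b :: t).drop ((a :: b :: t).length / 2)),
        merge_closed, List.take_append_drop]
termination_by rows.length
decreasing_by
  · simp [List.length_take]; omega
  · simp [List.length_drop]; omega

-- ===== VERDICT (by name: the statement is the Claim_ definition above) =====
theorem summarize_rag6_spec : Claim_equal_summarize_rag6 := by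
  intro rows _
  show summarize_rag6 rows = summarize_rag6_alt rows
  rw [a_closed, alt_closed]
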